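-- pv_equiv track=rewrite | github.com/Zippo00/SystemSecurityBot | backendfuncx.py | remove_sentence
-- ===== SOURCE A (Python) =====
-- def remove_sentence(response_to_scan):
--     '''
--     If a specified sentence is found in parameter response, removes the sentence from it and returns the modified string.
--     If no sentences to remove are found in the given string, returns the original string.
--
--     :param response: (string) Completion message from ChatGPT.
--     :return: (string) The message given as parameter without the specified sentences.
--     '''
--     if not isinstance(response_to_scan, str):
--         return "Parameter response must be a string."
--     to_remove =  [
--                     "Based on the logs you provided,", "Based on the logs you provided.",
--                     "Based on the logs you provided", "based on the logs you provided,",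
--                     "based on the logs you provided.", "based on the logs you provided",
--                     "Based on logs you provided,", "Based on logs you provided.",
--                     "Based on logs you provided", "based on logs you provided,",
--                     "based on logs you provided.", "based on logs you provided"
--                     ]
--     for sentence in to_remove:
--         if sentence in response_to_scan:
--             response_to_scan = response_to_scan.replace(sentence, "")
--     while response_to_scan[0] == " ":
--         response_to_scan = response_to_scan[1:]
--     if response_to_scan[0].isupper() == False:
--         response_to_scan = response_to_scan[0].upper() + response_to_scan[1:]
--     return response_to_scan
-- ===== SOURCE B (Python) =====
-- def _without(text, phrases):
--     '''Recursively remove every occurrence of each phrase, in order.'''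
--     if not phrases:
--         return text
--     return _without(text.replace(phrases[0], ""), phrases[1:])
--
-- def remove_sentence(response_to_scan):
--     '''Remove the boilerplate "based on (the) logs you provided" phrases,
--     trim leading spaces and capitalize the first letter.'''
--     if not isinstance(response_to_scan, str):
--         return "Parameter response must be a string."
--     phrases = [f"{b}ased on {t}logs you provided{p}"
--                for t in ("the ", "") for b in "Bb" for p in (",", ".", "")]
--     text = _without(response_to_scan, phrases).lstrip(" ")
--     return text if text[:1].isupper() else text[:1].upper() + text[1:]
-- ===== Notes on version B (the rewrite author's own statement) =====
-- stated objective: simpler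
-- what changed: The hard-coded 12-entry phrase list with a guarded replace loop and a character-by-character while/index trim-and-capitalize is replaced by a comprehension-generated phrase list, a recursive removal helper, lstrip(' ') and slice-based capitalization that also tolerates an empty result.
-- outside the precondition, e.g. on remove_sentence(' '): A raises IndexError, B returns ''
import Mathlib
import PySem

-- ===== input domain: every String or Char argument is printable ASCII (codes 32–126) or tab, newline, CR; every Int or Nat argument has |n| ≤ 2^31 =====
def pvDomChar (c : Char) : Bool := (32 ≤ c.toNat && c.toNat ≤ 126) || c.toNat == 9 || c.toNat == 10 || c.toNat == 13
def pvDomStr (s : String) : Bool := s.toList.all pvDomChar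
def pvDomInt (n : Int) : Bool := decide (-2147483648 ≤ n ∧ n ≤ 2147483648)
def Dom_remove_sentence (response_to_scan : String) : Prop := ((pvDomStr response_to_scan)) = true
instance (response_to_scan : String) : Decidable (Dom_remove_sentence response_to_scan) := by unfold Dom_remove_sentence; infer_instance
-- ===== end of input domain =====

-- B replaces A's hard-coded 12-phrase list and guarded replace loop by a comprehension-generated
-- phrase list, a recursive removal helper, lstrip(' ') and slice-based capitalization (objective:
-- simpler; same cost). Equivalence of the RETURN value is proved on Pre_ (where A does not raise).

-- ===== PORT A =====
-- A's literal 12-entry phrase list (insertion order preserved).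
def pvPhrasesA : List (List Char) :=
  [ "Based on the logs you provided,".toList, "Based on the logs you provided.".toList,
    "Based on the logs you provided".toList,  "based on the logs you provided,".toList,
    "based on the logs you provided.".toList, "based on the logs you provided".toList,
    "Based on logs you provided,".toList,     "Based on logs you provided.".toList,
    "Based on logs you provided".toList,      "based on logs you provided,".toList,
    "based on logs you provided.".toList,     "based on logs you provided".toList ]

-- A's 'while response_to_scan[0] == " ": response_to_scan = response_to_scan[1:]' loop;
-- on [] Python raises IndexError (excluded by Pre_), the port returns [] there.
def pvStripLoopA : List Char → List Char
  | [] => []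
  | c :: cs => if c = ' ' then pvStripLoopA cs else c :: cs

def remove_sentence (response_to_scan : String) : String :=
  -- for sentence in to_remove: if sentence in s: s = s.replace(sentence, "")
  let t1 := pvPhrasesA.foldl
    (fun t p => if PySem.Chars.isIn p t then PySem.Chars.replace t p [] else t)
    response_to_scan.toList
  let t2 := pvStripLoopA t1
  -- if response_to_scan[0].isupper() == False: s = s[0].upper() + s[1:]
  match t2 with
  | [] => String.ofList []   -- Python raises IndexError here (excluded by Pre_)
  | c :: cs =>
      if PySem.Chars.isupper c = false then String.ofList (PySem.Chars.upperChar c :: cs)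
      else String.ofList (c :: cs)

-- ===== PORT B =====
-- phrases = [f"{b}ased on {t}logs you provided{p}" for t in ("the ", "") for b in "Bb" for p in (",", ".", "")]
def pvPhrasesB : List (List Char) :=
  (["the ".toList, ([] : List Char)]).flatMap fun t =>
    ("Bb".toList).flatMap fun b =>
      ([",".toList, ".".toList, ([] : List Char)]).map fun p =>
        b :: ("ased on ".toList ++ t ++ "logs you provided".toList ++ p)

-- def _without(text, phrases): return text if not phrases else _without(text.replace(phrases[0], ""), phrases[1:])
def pvWithout : List Char → List (List Char) → List Char
  | text, [] => text
  | text, p :: ps => pvWithout (PySem.Chars.replace text p []) ps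

def remove_sentence_alt (response_to_scan : String) : String :=
  -- .lstrip(" ") ported by hand as dropWhile (· == ' '): exact, it drops exactly the leading spaces
  let text := (pvWithout response_to_scan.toList pvPhrasesB).dropWhile (· == ' ')
  -- return text if text[:1].isupper() else text[:1].upper() + text[1:]  (''.isupper() is False)
  match text with
  | [] => String.ofList []
  | c :: cs =>
      if PySem.Chars.isupper c then String.ofList (c :: cs)
      else String.ofList (PySem.Chars.upperChar c :: cs)

-- ===== PRECONDITION & SPEC =====
-- the string left after removing all phrases and leading spaces (used only to state Pre_:
-- A raises IndexError exactly when this is empty, i.e. the scrubbed input is empty or all spaces)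
def pvCleaned (response_to_scan : String) : List Char :=
  (pvPhrasesA.foldl (fun t p => PySem.Chars.replace t p []) response_to_scan.toList).dropWhile (· == ' ')

-- Pre_ excludes exactly the inputs on which A raises IndexError (after removals only spaces remain).
def Pre_remove_sentence (response_to_scan : String) : Prop :=
  pvCleaned response_to_scan ≠ []
instance (response_to_scan : String) : Decidable (Pre_remove_sentence response_to_scan) := by
  unfold Pre_remove_sentence; infer_instance

def pvWitness_remove_sentence : String := "based on the logs you provided, it works"

def Spec_remove_sentence (response_to_scan : String) (out : String) : Prop := out = remove_sentence_alt response_to_scan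
instance (response_to_scan : String) (out : String) : Decidable (Spec_remove_sentence response_to_scan out) := by unfold Spec_remove_sentence; infer_instance

-- ===== CLAIM (what is proved, stated in full; the proofs are below) =====
def Claim_equal_remove_sentence : Prop := ∀ (response_to_scan : String), Dom_remove_sentence response_to_scan → Pre_remove_sentence response_to_scan → Spec_remove_sentence response_to_scan (remove_sentence response_to_scan)

-- ===== LEMMAS AND PROOFS =====

-- replace.go with no occurrence of old never takes the replace branch
lemma pv_replace_go_no_occ (old : List Char) (fuel : Nat) :
    ∀ (l acc : List Char), ¬ old <:+: l →
      PySem.Chars.replace.go old [] fuel l acc = acc.reverse ++ l := by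
  induction fuel with
  | zero => intro l acc _; rfl
  | succ n ih =>
      intro l acc h
      cases l with
      | nil => simp [PySem.Chars.replace.go]
      | cons c t =>
          have hpre : old.isPrefixOf (c :: t) = false := by
            cases hb : old.isPrefixOf (c :: t) with
            | false => rfl
            | true => exact absurd (List.IsPrefix.isInfix (List.isPrefixOf_iff_prefix.mp hb)) h
          have htail : ¬ old <:+: t := fun hi => h (hi.trans (List.suffix_cons c t).isInfix)
          simp only [PySem.Chars.replace.go, hpre]
          rw [ih t (c :: acc) htail]
          simp

-- s.replace(old, "") is s when old does not occur in s
lemma pv_replace_of_not_isIn (s old : List Char) (hne : old ≠ [])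
    (h : PySem.Chars.isIn old s = false) :
    PySem.Chars.replace s old [] = s := by
  have hocc : ¬ old <:+: s := (PySem.Chars.isIn_eq_false_iff old s).mp h
  simp only [PySem.Chars.replace, List.isEmpty_eq_false_iff.mpr hne]
  simpa using pv_replace_go_no_occ old s.length s [] hocc

-- A's guarded replace loop equals B's recursive unconditional removal
lemma pv_fold_eq_without (ps : List (List Char)) (hne : ∀ p ∈ ps, p ≠ []) :
    ∀ t, ps.foldl (fun t p => if PySem.Chars.isIn p t then PySem.Chars.replace t p [] else t) t
      = pvWithout t ps := by
  induction ps with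
  | nil => intro t; rfl
  | cons p ps ih =>
      intro t
      have hp : p ≠ [] := hne p (by simp)
      have step : (if PySem.Chars.isIn p t then PySem.Chars.replace t p [] else t)
          = PySem.Chars.replace t p [] := by
        cases hin : PySem.Chars.isIn p t with
        | true => simp
        | false => simp [pv_replace_of_not_isIn t p hp hin]
      simp only [List.foldl_cons, pvWithout, step]
      exact ih (fun q hq => hne q (by simp [hq])) _

lemma pv_phrases_eq : pvPhrasesA = pvPhrasesB := by decide

lemma pv_phrases_ne : ∀ p ∈ pvPhrasesA, p ≠ [] := by decide

-- A's while loop is lstrip(' ')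
lemma pv_striploop_eq (l : List Char) : pvStripLoopA l = l.dropWhile (· == ' ') := by
  induction l with
  | nil => rfl
  | cons c cs ih =>
      by_cases hc : c = ' '
      · simp [pvStripLoopA, hc, ih]
      · simp [pvStripLoopA, hc]

-- ===== VERDICT (by name: the statement is the Claim_ definition above) =====
theorem remove_sentence_spec : Claim_equal_remove_sentence := by
  intro s _ hpre
  unfold Spec_remove_sentence remove_sentence remove_sentence_alt
  have htext : pvStripLoopA
      (pvPhrasesA.foldl (fun t p => if PySem.Chars.isIn p t then PySem.Chars.replace t p [] else t) s.toList)
      = (pvWithout s.toList pvPhrasesB).dropWhile (· == ' ') := by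
    rw [pv_striploop_eq, pv_fold_eq_without pvPhrasesA pv_phrases_ne, pv_phrases_eq]
  simp only [htext]
  cases hm : (pvWithout s.toList pvPhrasesB).dropWhile (· == ' ') with
  | nil => rfl
  | cons c cs =>
      cases hu : PySem.Chars.isupper c with
      | true => simp [hu]
      | false => simp [hu]
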